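-- pv_equiv track=rewrite | github.com/sdfrew2/stuff | aoc2020/4/day4.py | parseDb
-- ===== SOURCE A (Python) =====
-- def parseDb(fh):
--     record = {}
--     result = [record]
--     for line in fh:
--         line = line.strip()
--         if len(line) == 0:
--             record = {}
--             result.append(record)
--             continue
--         tokens = line.split(" ")
--         for token in tokens:
--             (k, v) = token.split(":")
--             record[k] = v
--     return result
-- ===== SOURCE B (Python) =====
-- def parseDb(fh):
--     groups = [[]]
--     for line in fh:
--         l = line.strip()
--         if l:
--             groups[-1].append(l)
--         else:
--             groups.append([])
--     return [dict(tok.split(":") for l in g for tok in l.split(" ")) for g in groups]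
-- ===== Notes on version B (the rewrite author's own statement) =====
-- stated objective: alternative
-- what changed: Replaces A's single pass that mutates a dict aliased inside the growing result list with two phases: first partition the stripped lines into blank-separated groups, then build each group's dict independently with a dict(...) over a generator of key:value pairs.
import Mathlib
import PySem

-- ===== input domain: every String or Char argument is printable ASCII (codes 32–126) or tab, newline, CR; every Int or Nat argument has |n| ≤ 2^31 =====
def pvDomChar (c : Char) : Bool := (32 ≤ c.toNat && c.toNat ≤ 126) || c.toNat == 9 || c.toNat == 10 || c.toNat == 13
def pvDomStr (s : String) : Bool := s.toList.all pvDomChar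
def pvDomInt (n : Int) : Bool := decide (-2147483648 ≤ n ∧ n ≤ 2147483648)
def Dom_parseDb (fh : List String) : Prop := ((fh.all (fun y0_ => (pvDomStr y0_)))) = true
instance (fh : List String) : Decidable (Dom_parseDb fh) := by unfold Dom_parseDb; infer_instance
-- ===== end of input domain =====

-- B restructures A's single mutating pass into two phases (group stripped lines, then build one dict per group); return values proved equal on Pre_ (where A does not raise).

-- ===== PORT A =====
-- 'record[k] = v' for a token; a token whose ':'-split is not a pair makes Python raise ValueError (excluded by Pre_), the port leaves the dict unchanged there
def pvTokFoldA (r : PySem.Dict String String) (token : String) : PySem.Dict String String :=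
  match (PySem.Str.split? token ":").getD [] with
  | [k, v] => r.insert k v
  | _ => r

-- loop body; Python's aliasing ('record' is the last element of 'result') is modelled by the state (finished records, current record)
def pvStepA (st : List (PySem.Dict String String) × PySem.Dict String String) (line : String) :
    List (PySem.Dict String String) × PySem.Dict String String :=
  let l := PySem.Str.strip line
  if PySem.Str.len l = 0 then (st.1 ++ [st.2], PySem.Dict.empty)
  else (st.1, ((PySem.Str.split? l " ").getD []).foldl pvTokFoldA st.2)

def parseDb (fh : List String) : List (List (String × String)) :=
  let st := fh.foldl pvStepA ([], PySem.Dict.empty)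
  (st.1 ++ [st.2]).map PySem.Dict.items

-- ===== PORT B =====
-- one 'k:v' token as a pair; none where Python's dict(...) would raise ValueError (excluded by Pre_)
def pvPairOf (tok : String) : Option (String × String) :=
  match (PySem.Str.split? tok ":").getD [] with
  | [k, v] => some (k, v)
  | _ => none

-- dict(tok.split(":") for l in g for tok in l.split(" "))
def pvDictOf (g : List String) : PySem.Dict String String :=
  (g.flatMap (fun l => ((PySem.Str.split? l " ").getD []).filterMap pvPairOf)).foldl
    (fun d p => d.insert p.1 p.2) PySem.Dict.empty

-- grouping loop body: nonblank stripped line joins the current group, blank starts a new one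
def pvStepB (gs : List (List String) × List String) (line : String) :
    List (List String) × List String :=
  let l := PySem.Str.strip line
  if l ≠ "" then (gs.1, gs.2 ++ [l]) else (gs.1 ++ [gs.2], [])

def parseDb_alt (fh : List String) : List (List (String × String)) :=
  let gs := fh.foldl pvStepB ([], [])
  ((gs.1 ++ [gs.2]).map pvDictOf).map PySem.Dict.items

-- ===== PRECONDITION & SPEC =====
-- Pre_ excludes exactly the inputs where Python A raises ValueError: a nonblank stripped line
-- containing a space-separated token that does not split on ':' into exactly two parts.
def Pre_parseDb (fh : List String) : Prop :=
  ∀ line ∈ fh, PySem.Str.strip line = "" ∨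
    ∀ tok ∈ (PySem.Str.split? (PySem.Str.strip line) " ").getD [],
      ((PySem.Str.split? tok ":").getD []).length = 2
instance (fh : List String) : Decidable (Pre_parseDb fh) := by unfold Pre_parseDb; infer_instance

def pvWitness_parseDb : List String := ["ecl:gry pid:860033327", "  ", "byr:1937 iyr:2017"]

def Spec_parseDb (fh : List String) (out : List (List (String × String))) : Prop := out = parseDb_alt fh
instance (fh : List String) (out : List (List (String × String))) : Decidable (Spec_parseDb fh out) := by unfold Spec_parseDb; infer_instance

-- ===== CLAIM (what is proved, stated in full; the proofs are below) =====
def Claim_equal_parseDb : Prop := ∀ (fh : List String), Dom_parseDb fh → Pre_parseDb fh → Spec_parseDb fh (parseDb fh)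

-- ===== LEMMAS AND PROOFS =====
theorem pvTok_eq (ts : List String) (d : PySem.Dict String String) :
    (ts.filterMap pvPairOf).foldl (fun d p => d.insert p.1 p.2) d = ts.foldl pvTokFoldA d := by
  induction ts generalizing d with
  | nil => rfl
  | cons t ts ih =>
    simp only [List.filterMap_cons, List.foldl_cons]
    unfold pvPairOf pvTokFoldA
    rcases (PySem.Str.split? t ":").getD [] with _ | ⟨k, _ | ⟨v, _ | _⟩⟩ <;> exact ih _

theorem pvDictOf_nil : pvDictOf [] = PySem.Dict.empty := rfl

theorem pvDictOf_append (g : List String) (l : String) :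
    pvDictOf (g ++ [l]) = ((PySem.Str.split? l " ").getD []).foldl pvTokFoldA (pvDictOf g) := by
  unfold pvDictOf
  rw [List.flatMap_append, List.foldl_append]
  simp [pvTok_eq]

theorem pvLoop_eq (fh : List String) (done : List (List String)) (cur : List String) :
    fh.foldl pvStepA (done.map pvDictOf, pvDictOf cur)
      = ((fh.foldl pvStepB (done, cur)).1.map pvDictOf,
         pvDictOf (fh.foldl pvStepB (done, cur)).2) := by
  induction fh generalizing done cur with
  | nil => rfl
  | cons line rest ih =>
    simp only [List.foldl_cons]
    by_cases h : PySem.Str.strip line = ""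
    · have hA : pvStepA (done.map pvDictOf, pvDictOf cur) line
          = ((done ++ [cur]).map pvDictOf, pvDictOf []) := by
        simp [pvStepA, h, pvDictOf_nil]
      have hB : pvStepB (done, cur) line = (done ++ [cur], []) := by
        simp [pvStepB, h]
      rw [hA, hB, ih]
    · have hlen : PySem.Str.len (PySem.Str.strip line) ≠ 0 := by
        simpa [PySem.Str.len_eq, String.ext_iff] using h
      have hne : ¬ PySem.Chars.strip line.toList = [] := by
        intro he
        apply h
        apply String.toList_inj.mp
        rw [PySem.Str.toList_strip, he]
        rfl
      have hA : pvStepA (done.map pvDictOf, pvDictOf cur) line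
          = (done.map pvDictOf, pvDictOf (cur ++ [PySem.Str.strip line])) := by
        simp [pvStepA, hne, pvDictOf_append]
      have hB : pvStepB (done, cur) line = (done, cur ++ [PySem.Str.strip line]) := by
        simp [pvStepB, h]
      rw [hA, hB, ih]

-- ===== VERDICT (by name: the statement is the Claim_ definition above) =====
theorem parseDb_spec : Claim_equal_parseDb := by
  intro fh _ _
  unfold Spec_parseDb parseDb parseDb_alt
  have := pvLoop_eq fh [] []
  simp only [List.map_nil, pvDictOf_nil] at this
  rw [this]
  simp [List.map_append]
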